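-- pv_equiv track=rewrite | github.com/anishyathinesh/language-classifier | features.py | common_subs_2
-- ===== SOURCE A (Python) =====
-- def common_subs_2(str):
--     phrases = ['de het', 'en het', 'in de', 'toe ten', 'was van']
--     str = str.split()
--     len2 = []
--     for i in range(len(str)-1):
--         len2.append(' '.join(str[i:i+2]))
--     for p in phrases:
--         if p in len2:
--             return True
--     return False
-- ===== SOURCE B (Python) =====
-- def common_subs_2(str):
--     follows = {'de': 'het', 'en': 'het', 'in': 'de', 'toe': 'ten', 'was': 'van'}
--     prev = None
--     for w in str.split():
--         if prev is not None and follows.get(prev) == w: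
--             return True
--         prev = w
--     return False
-- ===== Notes on version B (the rewrite author's own statement) =====
-- stated objective: alternative
-- what changed: A materialises every bigram string and then scans that list once per phrase; B instead makes a stateful single pass over the words, carrying the previous word and consulting a successor table keyed by first word (valid because the five phrases have pairwise distinct first words), so no bigram string is ever constructed.
import Mathlib
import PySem

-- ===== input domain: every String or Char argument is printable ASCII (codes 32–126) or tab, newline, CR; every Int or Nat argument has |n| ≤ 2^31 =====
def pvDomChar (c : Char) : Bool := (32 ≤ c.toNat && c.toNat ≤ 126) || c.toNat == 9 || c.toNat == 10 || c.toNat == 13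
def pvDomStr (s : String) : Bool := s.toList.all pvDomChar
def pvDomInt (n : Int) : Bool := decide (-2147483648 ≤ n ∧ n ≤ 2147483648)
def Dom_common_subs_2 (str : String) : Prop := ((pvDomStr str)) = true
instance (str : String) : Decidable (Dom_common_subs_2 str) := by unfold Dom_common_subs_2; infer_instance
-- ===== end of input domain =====

-- B replaces A's 'build every bigram string, then scan the list once per phrase' by a stateful
-- single pass over the words carrying the previous word and consulting a successor table keyed
-- by first word (the five phrases have distinct first words); objective: alternative.

-- ===== PORT A =====
def common_subs_2 (str : String) : Bool :=
  let phrases : List String := ["de het", "en het", "in de", "toe ten", "was van"]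
  let words := PySem.Str.split₀ str
  let len2 : List String :=
    (PySem.List.pyRange 0 ((words.length : Int) - 1) 1).foldl
      (fun acc i => acc ++ [PySem.Str.join " " (PySem.List.slice words (some i) (some (i + 2)))]) []
  phrases.any (fun p => len2.contains p)

-- ===== PORT B =====
def csFollows : PySem.Dict String String :=
  PySem.Dict.ofList [("de", "het"), ("en", "het"), ("in", "de"), ("toe", "ten"), ("was", "van")]

-- the Python for-loop with early return and the 'prev' variable, as structural recursion
def csGo (prev : Option String) : List String → Bool
  | [] => false
  | w :: ws =>
      if (match prev with
          | some p => PySem.Dict.get? csFollows p == some w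
          | none => false) then true
      else csGo (some w) ws

def common_subs_2_alt (str : String) : Bool :=
  csGo none (PySem.Str.split₀ str)

-- ===== PRECONDITION & SPEC =====
def Spec_common_subs_2 (str : String) (out : Bool) : Prop := out = common_subs_2_alt str
instance (str : String) (out : Bool) : Decidable (Spec_common_subs_2 str out) := by unfold Spec_common_subs_2; infer_instance

-- ===== CLAIM (what is proved, stated in full; the proofs are below) =====
def Claim_equal_common_subs_2 : Prop := ∀ (str : String), Dom_common_subs_2 str → Spec_common_subs_2 str (common_subs_2 str)

-- ===== LEMMAS AND PROOFS =====

-- proof-side helper: Python's a + ' ' + b on .toList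
def pvCat3 (a b : String) : String := String.ofList (a.toList ++ ' ' :: b.toList)

theorem take2_drop (ws : List String) (j : Nat) (h : j + 1 < ws.length) :
    List.take 2 (List.drop j ws) = [ws[j], ws[j+1]] := by
  apply List.ext_getElem
  · simp; omega
  · intro i h1 h2
    have hi : i < 2 := by simpa using h2
    interval_cases i <;> simp [List.getElem_take, List.getElem_drop]

theorem bigrams_eq (ws : List String) :
    (PySem.List.pyRange 0 ((ws.length:Int)-1) 1).map
      (fun i => PySem.Str.join " " (PySem.List.slice ws (some i) (some (i+2))))
    = (ws.zip ws.tail).map (fun ab => pvCat3 ab.1 ab.2) := by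
  rcases ws with _ | ⟨w, ws'⟩
  · simp [PySem.List.pyRange]
  · set ws := w :: ws' with hws
    have hn : ((ws.length : Int) - 1) = ((ws'.length : Nat) : Int) := by simp [hws]
    rw [hn, PySem.List.pyRange_zero_natCast]
    rw [List.map_map]
    apply List.ext_getElem
    · simp [hws]
    · intro k h1 h2
      have hk : k + 1 < ws.length := by simp [hws] at h1 ⊢; omega
      simp only [List.getElem_map, List.getElem_range, List.getElem_zip, Function.comp]
      have h2' : ((k:Int) + 2) = ((k:Int) + ((2:Nat):Int)) := by norm_num
      rw [h2', PySem.List.slice_natCast_add, take2_drop ws k hk]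
      have htail : ws.tail[k]'(by simp [hws] at h2 ⊢; omega) = ws[k+1]'hk := by
        simp [List.getElem_tail]
      rw [htail]
      simp [PySem.Str.join, PySem.Chars.join, List.intercalate, pvCat3]

theorem any_swap (P : List String) (L : List (String × String)) :
    P.any (fun p => (L.map (fun ab => pvCat3 ab.1 ab.2)).contains p)
    = L.any (fun ab => P.contains (pvCat3 ab.1 ab.2)) := by
  apply Bool.eq_iff_iff.mpr
  simp only [List.any_eq_true, List.contains_iff_mem, List.mem_map]
  constructor
  · rintro ⟨p, hp, ⟨ab, hab, rfl⟩⟩; exact ⟨ab, hab, hp⟩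
  · rintro ⟨ab, hab, hp⟩; exact ⟨_, hp, ab, hab, rfl⟩

-- a ++ ' ' :: b splits uniquely against a pattern with a unique space
theorem cat_split (xs ys ps qs : List Char) (hp : ' ' ∉ ps) (hq : ' ' ∉ qs) :
    xs ++ ' ' :: ys = ps ++ ' ' :: qs ↔ xs = ps ∧ ys = qs := by
  induction xs generalizing ps with
  | nil =>
    cases ps with
    | nil => simp
    | cons p ps' =>
      simp only [List.nil_append, List.cons_append, List.cons.injEq]
      constructor
      · rintro ⟨rfl, _⟩; exact absurd (List.mem_cons_self) hp
      · rintro ⟨h, _⟩; exact absurd h (by simp)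
  | cons x xs' ih =>
    cases ps with
    | nil =>
      simp only [List.cons_append, List.nil_append, List.cons.injEq]
      constructor
      · rintro ⟨rfl, h⟩
        exact absurd (h ▸ List.mem_append_right xs' (List.mem_cons_self)) hq
      · rintro ⟨h, _⟩; exact absurd h.symm (by simp)
    | cons p ps' =>
      have hp' : ' ' ∉ ps' := fun h => hp (List.mem_cons_of_mem _ h)
      simp [List.cons_append, ih ps' hp', and_assoc]

-- first-match characterisation of the literal successor table
theorem csFollows_get (a b : String) (h : PySem.Dict.get? csFollows a = some b) :
    (a = "de" ∧ b = "het") ∨ (a = "en" ∧ b = "het") ∨ (a = "in" ∧ b = "de") ∨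
    (a = "toe" ∧ b = "ten") ∨ (a = "was" ∧ b = "van") := by
  by_cases c1 : a = "de"
  · subst c1; left; refine ⟨rfl, ?_⟩
    have hv : PySem.Dict.get? csFollows "de" = some "het" := by decide
    rw [hv] at h; exact (Option.some_inj.mp h).symm
  by_cases c2 : a = "en"
  · subst c2; right; left; refine ⟨rfl, ?_⟩
    have hv : PySem.Dict.get? csFollows "en" = some "het" := by decide
    rw [hv] at h; exact (Option.some_inj.mp h).symm
  by_cases c3 : a = "in"
  · subst c3; right; right; left; refine ⟨rfl, ?_⟩
    have hv : PySem.Dict.get? csFollows "in" = some "de" := by decide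
    rw [hv] at h; exact (Option.some_inj.mp h).symm
  by_cases c4 : a = "toe"
  · subst c4; right; right; right; left; refine ⟨rfl, ?_⟩
    have hv : PySem.Dict.get? csFollows "toe" = some "ten" := by decide
    rw [hv] at h; exact (Option.some_inj.mp h).symm
  by_cases c5 : a = "was"
  · subst c5; right; right; right; right; refine ⟨rfl, ?_⟩
    have hv : PySem.Dict.get? csFollows "was" = some "van" := by decide
    rw [hv] at h; exact (Option.some_inj.mp h).symm
  · exfalso
    have hi : csFollows.items
        = [("de", "het"), ("en", "het"), ("in", "de"), ("toe", "ten"), ("was", "van")] := by decide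
    have e1 : (("de" : String) == a) = false := by simp [Ne.symm c1]
    have e2 : (("en" : String) == a) = false := by simp [Ne.symm c2]
    have e3 : (("in" : String) == a) = false := by simp [Ne.symm c3]
    have e4 : (("toe" : String) == a) = false := by simp [Ne.symm c4]
    have e5 : (("was" : String) == a) = false := by simp [Ne.symm c5]
    simp [PySem.Dict.get?, hi, List.find?, e1, e2, e3, e4, e5] at h

-- pointwise: phrase-list membership of the bigram  =  successor-table hit
theorem pointwise (a b : String) :
    (["de het", "en het", "in de", "toe ten", "was van"] : List String).contains (pvCat3 a b)
    = (PySem.Dict.get? csFollows a == some b) := by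
  have key : ∀ (p q : String), (' ' ∉ p.toList) → (' ' ∉ q.toList) →
      ((pvCat3 a b = String.ofList (p.toList ++ ' ' :: q.toList)) ↔ (a = p ∧ b = q)) := by
    intro p q hp hq
    unfold pvCat3
    rw [String.ofList_inj, cat_split _ _ _ _ hp hq]
    constructor
    · rintro ⟨h1, h2⟩
      refine ⟨?_, ?_⟩
      · have := congrArg String.ofList h1; simpa [String.ofList_toList] using this
      · have := congrArg String.ofList h2; simpa [String.ofList_toList] using this
    · rintro ⟨rfl, rfl⟩; exact ⟨rfl, rfl⟩
  have h1 := key "de" "het" (by decide) (by decide)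
  have h2 := key "en" "het" (by decide) (by decide)
  have h3 := key "in" "de" (by decide) (by decide)
  have h4 := key "toe" "ten" (by decide) (by decide)
  have h5 := key "was" "van" (by decide) (by decide)
  have e1 : ("de het" : String) = String.ofList (("de" : String).toList ++ ' ' :: ("het" : String).toList) := by decide
  have e2 : ("en het" : String) = String.ofList (("en" : String).toList ++ ' ' :: ("het" : String).toList) := by decide
  have e3 : ("in de" : String) = String.ofList (("in" : String).toList ++ ' ' :: ("de" : String).toList) := by decide
  have e4 : ("toe ten" : String) = String.ofList (("toe" : String).toList ++ ' ' :: ("ten" : String).toList) := by decide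
  have e5 : ("was van" : String) = String.ofList (("was" : String).toList ++ ' ' :: ("van" : String).toList) := by decide
  apply Bool.eq_iff_iff.mpr
  rw [List.contains_iff_mem, beq_iff_eq]
  simp only [List.mem_cons, List.not_mem_nil, or_false]
  constructor
  · rintro (h | h | h | h | h)
    · obtain ⟨rfl, rfl⟩ := (e1 ▸ h1).mp h; decide
    · obtain ⟨rfl, rfl⟩ := (e2 ▸ h2).mp h; decide
    · obtain ⟨rfl, rfl⟩ := (e3 ▸ h3).mp h; decide
    · obtain ⟨rfl, rfl⟩ := (e4 ▸ h4).mp h; decide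
    · obtain ⟨rfl, rfl⟩ := (e5 ▸ h5).mp h; decide
  · intro hget
    rcases csFollows_get a b hget with ⟨rfl, rfl⟩ | ⟨rfl, rfl⟩ | ⟨rfl, rfl⟩ | ⟨rfl, rfl⟩ | ⟨rfl, rfl⟩
    · left; exact (e1 ▸ h1).mpr ⟨rfl, rfl⟩
    · right; left; exact (e2 ▸ h2).mpr ⟨rfl, rfl⟩
    · right; right; left; exact (e3 ▸ h3).mpr ⟨rfl, rfl⟩
    · right; right; right; left; exact (e4 ▸ h4).mpr ⟨rfl, rfl⟩
    · right; right; right; right; exact (e5 ▸ h5).mpr ⟨rfl, rfl⟩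

-- loop invariant for csGo with a known previous word
theorem csGo_some (ws : List String) (p : String) :
    csGo (some p) ws
    = ((p :: ws).zip ws).any (fun ab => PySem.Dict.get? csFollows ab.1 == some ab.2) := by
  induction ws generalizing p with
  | nil => simp [csGo]
  | cons w ws ih =>
    simp only [csGo, List.zip_cons_cons, List.any_cons]
    rw [ih w]
    by_cases h : PySem.Dict.get? csFollows p == some w <;> simp [h]

-- ===== VERDICT (by name: the statement is the Claim_ definition above) =====
theorem common_subs_2_spec : Claim_equal_common_subs_2 := by
  intro str _
  unfold Spec_common_subs_2 common_subs_2 common_subs_2_alt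
  simp only [PySem.List.foldl_append_singleton_eq_map, List.nil_append, bigrams_eq, any_swap]
  cases h : PySem.Str.split₀ str with
  | nil => simp [csGo]
  | cons w ws =>
    simp only [List.tail_cons, pointwise]
    rw [← csGo_some ws w]
    simp [csGo]
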